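-- pv_equiv track=rewrite | github.com/gavinjblair/multi-modal-ai-assistant | backend/app/services/vlm_service.py | _normalize_section_bullets
-- ===== SOURCE A (Python) =====
-- def _normalize_section_bullets(text: str, sections: list[str]) -> str:
--     lines = text.splitlines()
--     current_section = None
--     output_lines: list[str] = []
--     section_set = {section.lower(): section for section in sections}
--
--     def is_section(line: str) -> str | None:
--         trimmed = line.strip()
--         for section in sections:
--             if trimmed.lower().startswith(section.lower()):
--                 return section
--         return None
--
--     for line in lines:
--         section = is_section(line)
--         if section:
--             current_section = section
--             output_lines.append(section)
--             continue
--
--         if current_section: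
--             stripped = line.strip()
--             if not stripped:
--                 continue
--             if stripped.startswith(("-", "*")):
--                 output_lines.append(f"- {stripped.lstrip('-* ').strip()}")
--             else:
--                 output_lines.append(f"- {stripped}")
--         else:
--             output_lines.append(line)
--
--     # Ensure each section has at least one bullet line
--     normalized: list[str] = []
--     i = 0
--     while i < len(output_lines):
--         line = output_lines[i]
--         normalized.append(line)
--         if line in sections:
--             next_line = output_lines[i + 1] if i + 1 < len(output_lines) else ""
--             if not next_line.strip().startswith("-"):
--                 normalized.append("- Not specified.")
--         i += 1
--
--     return "\n".join(normalized)
-- ===== SOURCE B (Python) =====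
-- def _normalize_section_bullets(text: str, sections: list[str]) -> str:
--     def is_section(line: str) -> str | None:
--         trimmed = line.strip()
--         for section in sections:
--             if trimmed.lower().startswith(section.lower()):
--                 return section
--         return None
--
--     output: list[str] = []
--     current_section = None
--     pending = False  # last emitted line is (textually) a section name, bullet not yet seen
--
--     def emit(entry: str) -> None:
--         nonlocal pending
--         if pending and not entry.strip().startswith("-"):
--             output.append("- Not specified.")
--         output.append(entry)
--         pending = entry in sections
--
--     for line in text.splitlines():
--         section = is_section(line)
--         if section:
--             current_section = section
--             emit(section)
--         elif current_section:
--             stripped = line.strip()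
--             if stripped:
--                 emit(f"- {stripped.lstrip('-* ').strip()}" if stripped.startswith(("-", "*")) else f"- {stripped}")
--         else:
--             emit(line)
--
--     if pending:
--         output.append("- Not specified.")
--     return "\n".join(output)
-- ===== Notes on version B (the rewrite author's own statement) =====
-- stated objective: simpler
-- what changed: B fuses A's two passes (build output_lines, then re-walk it by index to insert '- Not specified.' after bullet-less section lines) into a single pass that emits lines directly and carries a pending flag for the last emitted line's section membership, handling the trailing section after the loop.
import Mathlib
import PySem

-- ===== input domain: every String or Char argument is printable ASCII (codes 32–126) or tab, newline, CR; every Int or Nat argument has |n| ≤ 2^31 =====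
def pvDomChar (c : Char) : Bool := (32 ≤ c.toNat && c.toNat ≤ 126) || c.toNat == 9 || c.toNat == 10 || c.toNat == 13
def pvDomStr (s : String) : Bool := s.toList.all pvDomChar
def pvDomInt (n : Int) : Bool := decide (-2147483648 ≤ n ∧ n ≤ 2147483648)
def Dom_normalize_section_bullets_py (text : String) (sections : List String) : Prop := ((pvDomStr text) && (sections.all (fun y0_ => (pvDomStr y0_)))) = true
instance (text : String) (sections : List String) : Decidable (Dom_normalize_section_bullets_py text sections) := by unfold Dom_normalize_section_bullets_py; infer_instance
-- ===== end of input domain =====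

-- B fuses A's two passes into a single pass: the "- Not specified." placeholder is
-- inserted on the fly via a pending flag instead of a second index-walk over the
-- intermediate list (objective: simpler, one pass instead of two).

-- ===== PORT A =====
-- is_section: first section whose lowered name prefixes the lowered trimmed line (first match = find?)
def pvIsSectionA (sections : List String) (line : String) : Option String :=
  let trimmed := PySem.Str.strip line
  sections.find? (fun sec =>
    PySem.Str.startswith (PySem.Str.lower trimmed) (PySem.Str.lower sec))

-- Python truthiness of `if section:` — None and "" are falsy
def pvTruthyA (o : Option String) : Option String :=
  match o with
  | some s => if s == "" then none else some s
  | none => none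

-- the bullet-normalized entry for a non-empty stripped line inside a section;
-- Python's stripped.lstrip('-* ') drops exactly the leading '-','*',' ' chars (exact)
def pvEntryA (stripped : String) : String :=
  if PySem.Str.startswith stripped "-" || PySem.Str.startswith stripped "*" then
    "- " ++ PySem.Str.strip
      (String.ofList (stripped.toList.dropWhile (fun c => c == '-' || c == '*' || c == ' ')))
  else
    "- " ++ stripped

-- first pass: build output_lines (current_section is only ever set to a truthy, i.e.
-- non-empty, section name, so `if current_section:` is exactly `cur.isSome`)
def pvPhase1A (sections : List String) : List String → Option String → List String → List String
  | [], _, out => out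
  | line :: rest, cur, out =>
    match pvTruthyA (pvIsSectionA sections line) with
    | some sec => pvPhase1A sections rest (some sec) (out ++ [sec])
    | none =>
      if cur.isSome then
        let stripped := PySem.Str.strip line
        if stripped == "" then pvPhase1A sections rest cur out
        else pvPhase1A sections rest cur (out ++ [pvEntryA stripped])
      else pvPhase1A sections rest cur (out ++ [line])

-- second pass: the while loop over output_lines (i advances by 1, output_lines[i+1] is
-- the head of the remaining list, "" past the end)
def pvPhase2A (sections : List String) : List String → List String → List String
  | [], normalized => normalized
  | line :: rest, normalized =>
    let normalized := normalized ++ [line]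
    let normalized :=
      if sections.contains line then
        if !(PySem.Str.startswith (PySem.Str.strip (rest.headD "")) "-") then
          normalized ++ ["- Not specified."]
        else normalized
      else normalized
    pvPhase2A sections rest normalized

def normalize_section_bullets_py (text : String) (sections : List String) : String :=
  PySem.Str.join "\n"
    (pvPhase2A sections (pvPhase1A sections (PySem.Str.splitlines text) none []) [])

-- ===== PORT B =====
def pvIsSectionB (sections : List String) (line : String) : Option String :=
  let trimmed := PySem.Str.strip line
  sections.find? (fun sec =>
    PySem.Str.startswith (PySem.Str.lower trimmed) (PySem.Str.lower sec))

def pvTruthyB (o : Option String) : Option String :=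
  match o with
  | some s => if s == "" then none else some s
  | none => none

def pvEntryB (stripped : String) : String :=
  if PySem.Str.startswith stripped "-" || PySem.Str.startswith stripped "*" then
    "- " ++ PySem.Str.strip
      (String.ofList (stripped.toList.dropWhile (fun c => c == '-' || c == '*' || c == ' ')))
  else
    "- " ++ stripped

-- emit: flush the pending placeholder if needed, append the entry, refresh the flag
def pvEmitB (sections : List String) (out : List String) (pending : Bool) (entry : String) :
    List String × Bool :=
  let out :=
    if pending && !(PySem.Str.startswith (PySem.Str.strip entry) "-") then
      out ++ ["- Not specified."]
    else out
  (out ++ [entry], sections.contains entry)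

def pvLoopB (sections : List String) : List String → List String → Bool → Option String →
    List String × Bool
  | [], out, pending, _ => (out, pending)
  | line :: rest, out, pending, cur =>
    match pvTruthyB (pvIsSectionB sections line) with
    | some sec =>
      let st := pvEmitB sections out pending sec
      pvLoopB sections rest st.1 st.2 (some sec)
    | none =>
      if cur.isSome then
        let stripped := PySem.Str.strip line
        if stripped == "" then pvLoopB sections rest out pending cur
        else
          let st := pvEmitB sections out pending (pvEntryB stripped)
          pvLoopB sections rest st.1 st.2 cur
      else
        let st := pvEmitB sections out pending line
        pvLoopB sections rest st.1 st.2 cur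

def normalize_section_bullets_py_alt (text : String) (sections : List String) : String :=
  let st := pvLoopB sections (PySem.Str.splitlines text) [] false none
  PySem.Str.join "\n" (if st.2 then st.1 ++ ["- Not specified."] else st.1)


-- ===== PRECONDITION & SPEC =====
def Spec_normalize_section_bullets_py (text : String) (sections : List String) (out : String) : Prop := out = normalize_section_bullets_py_alt text sections
instance (text : String) (sections : List String) (out : String) : Decidable (Spec_normalize_section_bullets_py text sections out) := by unfold Spec_normalize_section_bullets_py; infer_instance

-- ===== CLAIM (what is proved, stated in full; the proofs are below) =====
def Claim_equal_normalize_section_bullets_py : Prop := ∀ (text : String) (sections : List String), Dom_normalize_section_bullets_py text sections → Spec_normalize_section_bullets_py text sections (normalize_section_bullets_py text sections)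

-- ===== LEMMAS AND PROOFS =====

theorem pvIsSectionB_eq : pvIsSectionB = pvIsSectionA := rfl
theorem pvTruthyB_eq : pvTruthyB = pvTruthyA := rfl
theorem pvEntryB_eq : pvEntryB = pvEntryA := rfl

-- the placeholder-insertion pass of A, as a recursion that carries whether the
-- previous emitted line was (textually) a member of `sections`
def pvIns (sections : List String) (p : Bool) : List String → List String
  | [] => if p then ["- Not specified."] else []
  | m :: rest =>
    (if p && !(PySem.Str.startswith (PySem.Str.strip m) "-") then ["- Not specified."] else []) ++
      m :: pvIns sections (sections.contains m) rest

theorem pvIns_shift (sections : List String) (l : String) (rest : List String) :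
    (if sections.contains l && !(PySem.Str.startswith (PySem.Str.strip (rest.headD "")) "-")
      then ["- Not specified."] else []) ++ pvIns sections false rest
    = pvIns sections (sections.contains l) rest := by
  cases rest with
  | nil =>
    have h : PySem.Chars.startswith (PySem.Chars.strip ([] : List Char)) ['-'] = false := by decide
    simp [pvIns, h]
  | cons m r => simp [pvIns]

theorem pvPhase2A_eq (sections : List String) (ls : List String) : ∀ acc,
    pvPhase2A sections ls acc = acc ++ pvIns sections false ls := by
  induction ls with
  | nil => intro acc; simp [pvPhase2A, pvIns]
  | cons l rest ih =>
    intro acc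
    simp only [pvPhase2A]
    rw [ih]
    conv_rhs => rw [pvIns]
    rw [← pvIns_shift sections l rest]
    split_ifs <;> simp_all [List.append_assoc]

theorem pvPhase1A_acc (sections : List String) (ls : List String) : ∀ cur acc,
    pvPhase1A sections ls cur acc = acc ++ pvPhase1A sections ls cur [] := by
  induction ls with
  | nil => intro cur acc; simp [pvPhase1A]
  | cons l rest ih =>
    intro cur acc
    simp only [pvPhase1A]
    cases pvTruthyA (pvIsSectionA sections l) with
    | some s =>
      dsimp only
      rw [ih _ (acc ++ [s]), ih _ ([] ++ [s])]; simp
    | none =>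
      dsimp only
      by_cases hc : cur.isSome
      · by_cases hs : PySem.Str.strip l == ""
        · simp only [hc, hs, if_true]; exact ih _ _
        · simp only [Bool.not_eq_true] at hs
          simp only [hc, hs, if_true, Bool.false_eq_true, if_false]
          rw [ih _ (acc ++ [pvEntryA (PySem.Str.strip l)]),
            ih _ ([] ++ [pvEntryA (PySem.Str.strip l)])]
          simp
      · simp only [Bool.not_eq_true] at hc
        simp only [hc, Bool.false_eq_true, if_false]
        rw [ih _ (acc ++ [l]), ih _ ([] ++ [l])]; simp

-- main invariant: running B's fused loop from any mid-state and finishing equals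
-- the pending-aware insertion pass applied to what A's first pass still produces
theorem pvMain (sections : List String) (ls : List String) : ∀ cur p out,
    (if (pvLoopB sections ls out p cur).2 then (pvLoopB sections ls out p cur).1 ++ ["- Not specified."]
      else (pvLoopB sections ls out p cur).1)
    = out ++ pvIns sections p (pvPhase1A sections ls cur []) := by
  induction ls with
  | nil =>
    intro cur p out
    cases p <;> simp [pvLoopB, pvPhase1A, pvIns]
  | cons l rest ih =>
    intro cur p out
    simp only [pvLoopB, pvPhase1A, pvTruthyB_eq, pvIsSectionB_eq, pvEntryB_eq]
    cases pvTruthyA (pvIsSectionA sections l) with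
    | some s =>
      dsimp only
      rw [pvPhase1A_acc sections rest (some s) ([] ++ [s])]
      simp only [pvEmitB, ih, List.singleton_append, List.append_assoc]
      split_ifs <;> cases p <;> simp_all [pvIns, List.append_assoc]
    | none =>
      dsimp only
      by_cases hc : cur.isSome
      · by_cases hs : PySem.Str.strip l == ""
        · simp only [hc, hs, if_true]; exact ih _ _ _
        · simp only [Bool.not_eq_true] at hs
          simp only [hc, hs, if_true, Bool.false_eq_true, if_false]
          rw [pvPhase1A_acc sections rest cur ([] ++ [pvEntryA (PySem.Str.strip l)])]
          simp only [pvEmitB, ih, List.singleton_append, List.append_assoc]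
          split_ifs <;> cases p <;> simp_all [pvIns, List.append_assoc]
      · simp only [Bool.not_eq_true] at hc
        simp only [hc, Bool.false_eq_true, if_false]
        rw [pvPhase1A_acc sections rest cur ([] ++ [l])]
        simp only [pvEmitB, ih, List.singleton_append, List.append_assoc]
        split_ifs <;> cases p <;> simp_all [pvIns, List.append_assoc]

-- ===== VERDICT (by name: the statement is the Claim_ definition above) =====
theorem normalize_section_bullets_py_spec : Claim_equal_normalize_section_bullets_py := by
  intro text sections _
  show normalize_section_bullets_py text sections = normalize_section_bullets_py_alt text sections
  show PySem.Str.join "\n"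
      (pvPhase2A sections (pvPhase1A sections (PySem.Str.splitlines text) none []) [])
    = PySem.Str.join "\n"
      (if (pvLoopB sections (PySem.Str.splitlines text) [] false none).2 then
        (pvLoopB sections (PySem.Str.splitlines text) [] false none).1 ++ ["- Not specified."]
      else (pvLoopB sections (PySem.Str.splitlines text) [] false none).1)
  rw [pvPhase2A_eq, pvMain]
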